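-- pv_equiv track=rewrite | github.com/MrBrantCode/unitest_baseline | mut_generate/mist_train_taco/taco_4219/solution.py | infer_original_messages
-- ===== SOURCE A (Python) =====
-- def infer_original_messages(n, orders, messages):
--     """
--     Infer the original messages from the final messages given the order of messengers.
--
--     Parameters:
--     n (int): The number of data sets.
--     orders (list of str): A list of strings where each string represents the order of messengers.
--     messages (list of str): A list of strings where each string represents the message given to the King.
--
--     Returns:
--     list of str: A list of inferred original messages.
--     """
--     d = '0123456789'
--     rr = []
--
--     for i in range(n):
--         s = orders[i]
--         m = messages[i]
--         l = len(m)
--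
--         for c in s[::-1]:
--             if c == 'J':
--                 m = m[-1] + m[:-1]
--             elif c == 'C':
--                 m = m[1:] + m[0]
--             elif c == 'E':
--                 if l % 2 == 0:
--                     m = m[l // 2:] + m[:l // 2]
--                 else:
--                     m = m[l // 2 + 1:] + m[l // 2] + m[:l // 2]
--             elif c == 'A':
--                 m = m[::-1]
--             elif c == 'P':
--                 m = ''.join([t if not t in d else d[d.index(t) - 1] for t in m])
--             elif c == 'M':
--                 m = ''.join([t if not t in d else d[(d.index(t) + 1) % 10] for t in m])
--
--         rr.append(m)
--
--     return rr
-- ===== SOURCE B (Python) =====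
-- def infer_original_messages(n, orders, messages):
--     d = '0123456789'
--     rr = []
--     for i in range(n):
--         s = orders[i]
--         m = messages[i]
--         l = len(m)
--         # maintain an index permutation and one scalar digit shift instead of
--         # rebuilding the string per operation
--         perm = list(range(l))
--         shift = 0
--         for c in reversed(s):
--             if c == 'J':
--                 perm = [perm[-1]] + perm[:-1]
--             elif c == 'C':
--                 perm = perm[1:] + [perm[0]]
--             elif c == 'E':
--                 if l % 2 == 0:
--                     perm = perm[l // 2:] + perm[:l // 2]
--                 else:
--                     perm = perm[l // 2 + 1:] + [perm[l // 2]] + perm[:l // 2]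
--             elif c == 'A':
--                 perm = perm[::-1]
--             elif c == 'P':
--                 shift -= 1
--             elif c == 'M':
--                 shift += 1
--         out = []
--         for k in perm:
--             ch = m[k]
--             out.append(d[(d.index(ch) + shift) % 10] if ch in d else ch)
--         rr.append(''.join(out))
--     return rr
-- ===== Notes on version B (the rewrite author's own statement) =====
-- stated objective: alternative
-- what changed: B never rebuilds the message string per operation: it maintains an index permutation for the positional moves and a single scalar net digit shift for P/M, then produces the answer in one final gather-and-shift pass over the original message.
import Mathlib
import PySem

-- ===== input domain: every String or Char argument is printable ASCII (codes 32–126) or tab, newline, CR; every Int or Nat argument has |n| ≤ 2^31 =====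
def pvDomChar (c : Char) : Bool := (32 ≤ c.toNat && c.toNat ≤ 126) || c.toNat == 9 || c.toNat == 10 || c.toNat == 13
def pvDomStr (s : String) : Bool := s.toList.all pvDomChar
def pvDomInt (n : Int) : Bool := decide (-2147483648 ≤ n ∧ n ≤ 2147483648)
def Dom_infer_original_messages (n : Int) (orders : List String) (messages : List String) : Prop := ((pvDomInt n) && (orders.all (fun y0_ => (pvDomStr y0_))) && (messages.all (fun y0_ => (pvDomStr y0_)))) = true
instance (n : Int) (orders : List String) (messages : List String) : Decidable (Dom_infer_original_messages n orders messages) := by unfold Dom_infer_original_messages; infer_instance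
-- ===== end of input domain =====

-- B replaces A's per-operation string rebuilding by an index permutation plus one
-- scalar net digit shift, producing the answer in a single final gather pass (objective: alternative).

-- ===== PORT A =====
-- d = '0123456789'
def pvDigits : List Char := ['0','1','2','3','4','5','6','7','8','9']

-- 'P' element map: t if t not in d else d[d.index(t) - 1]   (d[-1] wraps to '9', exact via pyGetD)
def pvDecChar (t : Char) : Char :=
  if pvDigits.contains t then PySem.List.pyGetD pvDigits (((PySem.List.index? pvDigits t).getD 0 : Int) - 1) t else t
-- 'M' element map: t if t not in d else d[(d.index(t) + 1) % 10]
def pvIncChar (t : Char) : Char :=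
  if pvDigits.contains t then PySem.List.pyGetD pvDigits (PySem.Int.mod (((PySem.List.index? pvDigits t).getD 0 : Int) + 1) 10) t else t

-- one iteration of A's inner loop on the message m (l = len(m), computed before the loop);
-- m[-1], m[0], m[l//2] → PySem.List.pyGetD (indices in range exactly when Python does not raise; Pre_ excludes the raising inputs),
-- m[:-1], m[1:], m[a:], m[:b] → PySem.List.slice, m[::-1] → reversal (PySem.List.slice?_none_none_neg_one)
def pvStepA (l : Int) (m : List Char) (c : Char) : List Char :=
  if c = 'J' then PySem.List.pyGetD m (-1) '?' :: PySem.List.slice m none (some (-1))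
  else if c = 'C' then PySem.List.slice m (some 1) none ++ [PySem.List.pyGetD m 0 '?']
  else if c = 'E' then
    if PySem.Int.mod l 2 = 0 then
      PySem.List.slice m (some (PySem.Int.floordiv l 2)) none ++ PySem.List.slice m none (some (PySem.Int.floordiv l 2))
    else
      PySem.List.slice m (some (PySem.Int.floordiv l 2 + 1)) none ++ [PySem.List.pyGetD m (PySem.Int.floordiv l 2) '?'] ++ PySem.List.slice m none (some (PySem.Int.floordiv l 2))
  else if c = 'A' then m.reverse
  else if c = 'P' then m.map pvDecChar
  else if c = 'M' then m.map pvIncChar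
  else m

-- one iteration of A's outer loop: s = orders[i]; m = messages[i]; l = len(m); fold the steps over s[::-1]
def pvDatasetA (orders messages : List String) (i : Int) : String :=
  let s := PySem.List.pyGetD orders i ""
  let m := PySem.List.pyGetD messages i ""
  let l : Int := PySem.Str.len m
  String.ofList (s.toList.reverse.foldl (pvStepA l) m.toList)

def infer_original_messages (n : Int) (orders : List String) (messages : List String) : List String :=
  (PySem.List.pyRange 0 n 1).foldl (fun rr i => rr ++ [pvDatasetA orders messages i]) []

-- ===== PORT B =====
-- one iteration of B's inner loop on the state (perm, shift)
def pvStepB (l : Int) (ps : List Int × Int) (c : Char) : List Int × Int :=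
  if c = 'J' then (PySem.List.pyGetD ps.1 (-1) 0 :: PySem.List.slice ps.1 none (some (-1)), ps.2)
  else if c = 'C' then (PySem.List.slice ps.1 (some 1) none ++ [PySem.List.pyGetD ps.1 0 0], ps.2)
  else if c = 'E' then
    (if PySem.Int.mod l 2 = 0 then
      PySem.List.slice ps.1 (some (PySem.Int.floordiv l 2)) none ++ PySem.List.slice ps.1 none (some (PySem.Int.floordiv l 2))
    else
      PySem.List.slice ps.1 (some (PySem.Int.floordiv l 2 + 1)) none ++ [PySem.List.pyGetD ps.1 (PySem.Int.floordiv l 2) 0] ++ PySem.List.slice ps.1 none (some (PySem.Int.floordiv l 2)), ps.2)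
  else if c = 'A' then (ps.1.reverse, ps.2)
  else if c = 'P' then (ps.1, ps.2 - 1)
  else if c = 'M' then (ps.1, ps.2 + 1)
  else ps

-- B's final gather of one character: ch = m[k]; d[(d.index(ch) + shift) % 10] if ch in d else ch
def pvGatherChar (m0 : List Char) (shift : Int) (k : Int) : Char :=
  let ch := PySem.List.pyGetD m0 k '?'
  if pvDigits.contains ch then PySem.List.pyGetD pvDigits (PySem.Int.mod (((PySem.List.index? pvDigits ch).getD 0 : Int) + shift) 10) ch else ch

-- one iteration of B's outer loop: perm = list(range(l)); shift = 0; fold over s[::-1]; then the gather loop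
def pvDatasetB (orders messages : List String) (i : Int) : String :=
  let s := PySem.List.pyGetD orders i ""
  let m := PySem.List.pyGetD messages i ""
  let l : Int := PySem.Str.len m
  let ps := s.toList.reverse.foldl (pvStepB l) (PySem.List.pyRange 0 l 1, 0)
  String.ofList (ps.1.foldl (fun out k => out ++ [pvGatherChar m.toList ps.2 k]) [])

def infer_original_messages_alt (n : Int) (orders : List String) (messages : List String) : List String :=
  (PySem.List.pyRange 0 n 1).foldl (fun rr i => rr ++ [pvDatasetB orders messages i]) []

-- ===== PRECONDITION & SPEC =====
-- Pre_ excludes exactly the inputs on which A raises IndexError (B raises there too):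
-- a dataset index below n with no order/message string, or an empty message whose order string contains 'J' or 'C'.
def Pre_infer_original_messages (n : Int) (orders : List String) (messages : List String) : Prop :=
  (n ≤ (orders.length : Int) ∧ n ≤ (messages.length : Int)) ∧
  ∀ i : Nat, i < n.toNat →
    (('J' ∈ (orders.getD i "").toList ∨ 'C' ∈ (orders.getD i "").toList) → (messages.getD i "").toList ≠ [])
instance (n : Int) (orders : List String) (messages : List String) : Decidable (Pre_infer_original_messages n orders messages) := by unfold Pre_infer_original_messages; infer_instance
def pvWitness_infer_original_messages : Int × List String × List String := (2, ["JCEAPM", "PA"], ["a1z9", "07 x"])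

def Spec_infer_original_messages (n : Int) (orders : List String) (messages : List String) (out : List String) : Prop := out = infer_original_messages_alt n orders messages
instance (n : Int) (orders : List String) (messages : List String) (out : List String) : Decidable (Spec_infer_original_messages n orders messages out) := by unfold Spec_infer_original_messages; infer_instance

-- ===== CLAIM (what is proved, stated in full; the proofs are below) =====
def Claim_equal_infer_original_messages : Prop := ∀ (n : Int) (orders : List String) (messages : List String), Dom_infer_original_messages n orders messages → Pre_infer_original_messages n orders messages → Spec_infer_original_messages n orders messages (infer_original_messages n orders messages)

-- ===== LEMMAS AND PROOFS =====

-- the digit char of value w (any in-range Python index; the default is irrelevant there)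
def pvDChar (w : Int) : Char := PySem.List.pyGetD pvDigits w '?'

-- the digit-shift function B's gather applies to one already-fetched character
def pvShiftChar (sh : Int) (t : Char) : Char :=
  if pvDigits.contains t then PySem.List.pyGetD pvDigits (PySem.Int.mod (((PySem.List.index? pvDigits t).getD 0 : Int) + sh) 10) t else t

theorem pvGatherChar_eq (m0 : List Char) (sh k : Int) :
    pvGatherChar m0 sh k = pvShiftChar sh (PySem.List.pyGetD m0 k '?') := rfl

theorem pvPyGetD_digits (w : Int) (d : Char) (h0 : -10 ≤ w) (h1 : w < 10) :
    PySem.List.pyGetD pvDigits w d = pvDChar (PySem.Int.mod w 10) := by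
  interval_cases w <;> rfl

theorem pvMod10_small (w : Int) (h0 : 0 ≤ w) (h1 : w < 10) : PySem.Int.mod w 10 = w := by
  rw [PySem.Int.mod_eq_emod_of_pos (by norm_num)]; omega

theorem pvMem_digit (t : Char) (h : pvDigits.contains t = true) :
    ∃ v : Int, 0 ≤ v ∧ v < 10 ∧ t = pvDChar v := by
  have h' : t ∈ pvDigits := by simpa using h
  fin_cases h'
  · exact ⟨0, by norm_num, by norm_num, by decide⟩
  · exact ⟨1, by norm_num, by norm_num, by decide⟩
  · exact ⟨2, by norm_num, by norm_num, by decide⟩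
  · exact ⟨3, by norm_num, by norm_num, by decide⟩
  · exact ⟨4, by norm_num, by norm_num, by decide⟩
  · exact ⟨5, by norm_num, by norm_num, by decide⟩
  · exact ⟨6, by norm_num, by norm_num, by decide⟩
  · exact ⟨7, by norm_num, by norm_num, by decide⟩
  · exact ⟨8, by norm_num, by norm_num, by decide⟩
  · exact ⟨9, by norm_num, by norm_num, by decide⟩

theorem pvContains_dchar (w : Int) (h0 : 0 ≤ w) (h1 : w < 10) :
    pvDigits.contains (pvDChar w) = true := by
  interval_cases w <;> decide

theorem pvIndex_dchar (w : Int) (h0 : 0 ≤ w) (h1 : w < 10) :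
    ((PySem.List.index? pvDigits (pvDChar w)).getD 0 : Int) = w := by
  interval_cases w <;> decide

theorem pvShiftChar_digit (v sh : Int) (h0 : 0 ≤ v) (h1 : v < 10) :
    pvShiftChar sh (pvDChar v) = pvDChar (PySem.Int.mod (v + sh) 10) := by
  have hw0 : (0:Int) ≤ PySem.Int.mod (v + sh) 10 := PySem.Int.mod_nonneg _ (by norm_num)
  have hw1 : PySem.Int.mod (v + sh) 10 < 10 := PySem.Int.mod_lt _ (by norm_num)
  simp only [pvShiftChar, pvContains_dchar v h0 h1, if_true, pvIndex_dchar v h0 h1]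
  rw [pvPyGetD_digits _ _ (by omega) hw1, pvMod10_small _ hw0 hw1]

theorem pvShift_zero (t : Char) : pvShiftChar 0 t = t := by
  by_cases h : pvDigits.contains t = true
  · obtain ⟨v, h0, h1, rfl⟩ := pvMem_digit t h
    rw [pvShiftChar_digit v 0 h0 h1, add_zero, pvMod10_small v h0 h1]
  · have h' : t ∉ pvDigits := by simpa using h
    simp [pvShiftChar, h']

theorem pvDec_shift (sh : Int) (t : Char) :
    pvDecChar (pvShiftChar sh t) = pvShiftChar (sh - 1) t := by
  by_cases h : pvDigits.contains t = true
  · obtain ⟨v, h0, h1, rfl⟩ := pvMem_digit t h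
    have hw0 : (0:Int) ≤ PySem.Int.mod (v + sh) 10 := PySem.Int.mod_nonneg _ (by norm_num)
    have hw1 : PySem.Int.mod (v + sh) 10 < 10 := PySem.Int.mod_lt _ (by norm_num)
    rw [pvShiftChar_digit v sh h0 h1, pvShiftChar_digit v (sh - 1) h0 h1]
    simp only [pvDecChar, pvContains_dchar _ hw0 hw1, if_true, pvIndex_dchar _ hw0 hw1]
    rw [pvPyGetD_digits _ _ (by omega) (by omega)]
    congr 1
    have h10 : (0:Int) < 10 := by norm_num
    simp only [PySem.Int.mod_eq_emod_of_pos h10]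
    omega
  · have h' : t ∉ pvDigits := by simpa using h
    have ht : pvShiftChar sh t = t := by simp [pvShiftChar, h']
    have ht' : pvShiftChar (sh - 1) t = t := by simp [pvShiftChar, h']
    rw [ht, ht']
    simp [pvDecChar, h']

theorem pvInc_shift (sh : Int) (t : Char) :
    pvIncChar (pvShiftChar sh t) = pvShiftChar (sh + 1) t := by
  by_cases h : pvDigits.contains t = true
  · obtain ⟨v, h0, h1, rfl⟩ := pvMem_digit t h
    have hw0 : (0:Int) ≤ PySem.Int.mod (v + sh) 10 := PySem.Int.mod_nonneg _ (by norm_num)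
    have hw1 : PySem.Int.mod (v + sh) 10 < 10 := PySem.Int.mod_lt _ (by norm_num)
    have hu0 : (0:Int) ≤ PySem.Int.mod (PySem.Int.mod (v + sh) 10 + 1) 10 := PySem.Int.mod_nonneg _ (by norm_num)
    have hu1 : PySem.Int.mod (PySem.Int.mod (v + sh) 10 + 1) 10 < 10 := PySem.Int.mod_lt _ (by norm_num)
    rw [pvShiftChar_digit v sh h0 h1, pvShiftChar_digit v (sh + 1) h0 h1]
    simp only [pvIncChar, pvContains_dchar _ hw0 hw1, if_true, pvIndex_dchar _ hw0 hw1]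
    rw [pvPyGetD_digits _ _ (by omega) hu1, pvMod10_small _ hu0 hu1]
    congr 1
    have h10 : (0:Int) < 10 := by norm_num
    simp only [PySem.Int.mod_eq_emod_of_pos h10]
    omega
  · have h' : t ∉ pvDigits := by simpa using h
    have ht : pvShiftChar sh t = t := by simp [pvShiftChar, h']
    have ht' : pvShiftChar (sh + 1) t = t := by simp [pvShiftChar, h']
    rw [ht, ht']
    simp [pvIncChar, h']

theorem pvStep_comm (m0 : List Char) (sh : Int) (perm : List Int) (c : Char)
    (hlen : perm.length = m0.length)
    (hne : (c = 'J' ∨ c = 'C') → perm ≠ []) :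
    pvStepA (m0.length : Int) (perm.map (pvGatherChar m0 sh)) c
      = (pvStepB (m0.length : Int) (perm, sh) c).1.map (pvGatherChar m0 (pvStepB (m0.length : Int) (perm, sh) c).2)
    ∧ (pvStepB (m0.length : Int) (perm, sh) c).1.length = perm.length := by
  by_cases hJ : c = 'J'
  · subst hJ
    have hp : perm ≠ [] := hne (Or.inl rfl)
    have hmp : perm.map (pvGatherChar m0 sh) ≠ [] := by simpa using hp
    have eA : pvStepA (m0.length : Int) (perm.map (pvGatherChar m0 sh)) 'J'
        = PySem.List.pyGetD (perm.map (pvGatherChar m0 sh)) (-1) '?'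
            :: PySem.List.slice (perm.map (pvGatherChar m0 sh)) none (some (-1)) := rfl
    have eB : pvStepB (m0.length : Int) (perm, sh) 'J'
        = (PySem.List.pyGetD perm (-1) 0 :: PySem.List.slice perm none (some (-1)), sh) := rfl
    rw [eA, eB]
    have hlp := List.length_pos_of_ne_nil hp
    constructor
    · rw [PySem.List.slice_to_neg_one, PySem.List.slice_to_neg_one,
          PySem.List.pyGetD_neg_one _ _ hmp, PySem.List.pyGetD_neg_one _ _ hp,
          List.getLast_map]
      simp [List.map_dropLast]
    · simp only [List.length_cons, PySem.List.slice_to_neg_one, List.length_dropLast]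
      omega
  · by_cases hC : c = 'C'
    · subst hC
      have hp : perm ≠ [] := hne (Or.inr rfl)
      rcases perm with _ | ⟨x, xs⟩
      · exact absurd rfl hp
      · have eA : pvStepA (m0.length : Int) ((x :: xs).map (pvGatherChar m0 sh)) 'C'
            = PySem.List.slice ((x :: xs).map (pvGatherChar m0 sh)) (some 1) none
                ++ [PySem.List.pyGetD ((x :: xs).map (pvGatherChar m0 sh)) 0 '?'] := rfl
        have eB : pvStepB (m0.length : Int) (x :: xs, sh) 'C'
            = (PySem.List.slice (x :: xs) (some 1) none ++ [PySem.List.pyGetD (x :: xs) 0 0], sh) := rfl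
        rw [eA, eB]
        constructor
        · simp [PySem.List.slice_from_one, PySem.List.pyGetD_zero_cons]
        · simp [PySem.List.slice_from_one]
    · by_cases hE : c = 'E'
      · subst hE
        have eA : pvStepA (m0.length : Int) (perm.map (pvGatherChar m0 sh)) 'E'
            = if PySem.Int.mod (m0.length : Int) 2 = 0 then
                PySem.List.slice (perm.map (pvGatherChar m0 sh)) (some (PySem.Int.floordiv (m0.length : Int) 2)) none
                  ++ PySem.List.slice (perm.map (pvGatherChar m0 sh)) none (some (PySem.Int.floordiv (m0.length : Int) 2))
              else
                PySem.List.slice (perm.map (pvGatherChar m0 sh)) (some (PySem.Int.floordiv (m0.length : Int) 2 + 1)) none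
                  ++ [PySem.List.pyGetD (perm.map (pvGatherChar m0 sh)) (PySem.Int.floordiv (m0.length : Int) 2) '?']
                  ++ PySem.List.slice (perm.map (pvGatherChar m0 sh)) none (some (PySem.Int.floordiv (m0.length : Int) 2)) := rfl
        have eB : pvStepB (m0.length : Int) (perm, sh) 'E'
            = (if PySem.Int.mod (m0.length : Int) 2 = 0 then
                PySem.List.slice perm (some (PySem.Int.floordiv (m0.length : Int) 2)) none
                  ++ PySem.List.slice perm none (some (PySem.Int.floordiv (m0.length : Int) 2))
              else
                PySem.List.slice perm (some (PySem.Int.floordiv (m0.length : Int) 2 + 1)) none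
                  ++ [PySem.List.pyGetD perm (PySem.Int.floordiv (m0.length : Int) 2) 0]
                  ++ PySem.List.slice perm none (some (PySem.Int.floordiv (m0.length : Int) 2)), sh) := rfl
        rw [eA, eB]
        have hdiv : PySem.Int.floordiv (m0.length : Int) 2 = (m0.length : Int) / 2 :=
          PySem.Int.floordiv_eq_ediv_of_pos (by norm_num)
        have hq0 : (0:Int) ≤ (m0.length : Int) / 2 := by omega
        have hqle : ((m0.length : Int) / 2).toNat ≤ perm.length := by omega
        by_cases h2 : PySem.Int.mod (m0.length : Int) 2 = 0
        · rw [if_pos h2, if_pos h2]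
          rw [hdiv, PySem.List.slice_from _ hq0, PySem.List.slice_from _ hq0,
              PySem.List.slice_to _ hq0, PySem.List.slice_to _ hq0]
          constructor
          · simp [List.map_drop, List.map_take]
          · simp only [List.length_append, List.length_drop, List.length_take]
            omega
        · rw [if_neg h2, if_neg h2]
          have hmod : (m0.length : Int) % 2 ≠ 0 := by
            rw [PySem.Int.mod_eq_emod_of_pos (by norm_num)] at h2; exact h2
          have hqlt : (m0.length : Int) / 2 < (perm.length : Int) := by omega
          have hq10 : (0:Int) ≤ (m0.length : Int) / 2 + 1 := by omega
          rw [hdiv, PySem.List.slice_from _ hq10, PySem.List.slice_from _ hq10,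
              PySem.List.slice_to _ hq0, PySem.List.slice_to _ hq0,
              PySem.List.pyGetD_eq_getElem _ _ hq0 (by simpa using hqlt),
              PySem.List.pyGetD_eq_getElem _ _ hq0 hqlt]
          constructor
          · simp [List.map_drop, List.map_take]
          · simp only [List.length_append, List.length_drop, List.length_take, List.length_cons,
              List.length_nil]
            omega
      · by_cases hA : c = 'A'
        · subst hA
          have eA : pvStepA (m0.length : Int) (perm.map (pvGatherChar m0 sh)) 'A'
              = (perm.map (pvGatherChar m0 sh)).reverse := rfl
          have eB : pvStepB (m0.length : Int) (perm, sh) 'A' = (perm.reverse, sh) := rfl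
          rw [eA, eB]
          exact ⟨by simp [List.map_reverse], by simp⟩
        · by_cases hP : c = 'P'
          · subst hP
            have eA : pvStepA (m0.length : Int) (perm.map (pvGatherChar m0 sh)) 'P'
                = (perm.map (pvGatherChar m0 sh)).map pvDecChar := rfl
            have eB : pvStepB (m0.length : Int) (perm, sh) 'P' = (perm, sh - 1) := rfl
            rw [eA, eB]
            refine ⟨?_, rfl⟩
            rw [List.map_map]
            apply List.map_congr_left
            intro k _
            show pvDecChar (pvGatherChar m0 sh k) = pvGatherChar m0 (sh - 1) k
            rw [pvGatherChar_eq, pvGatherChar_eq, pvDec_shift]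
          · by_cases hM : c = 'M'
            · subst hM
              have eA : pvStepA (m0.length : Int) (perm.map (pvGatherChar m0 sh)) 'M'
                  = (perm.map (pvGatherChar m0 sh)).map pvIncChar := rfl
              have eB : pvStepB (m0.length : Int) (perm, sh) 'M' = (perm, sh + 1) := rfl
              rw [eA, eB]
              refine ⟨?_, rfl⟩
              rw [List.map_map]
              apply List.map_congr_left
              intro k _
              show pvIncChar (pvGatherChar m0 sh k) = pvGatherChar m0 (sh + 1) k
              rw [pvGatherChar_eq, pvGatherChar_eq, pvInc_shift]
            · have eA : pvStepA (m0.length : Int) (perm.map (pvGatherChar m0 sh)) c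
                  = perm.map (pvGatherChar m0 sh) := by
                simp [pvStepA, hJ, hC, hE, hA, hP, hM]
              have eB : pvStepB (m0.length : Int) (perm, sh) c = (perm, sh) := by
                simp [pvStepB, hJ, hC, hE, hA, hP, hM]
              rw [eA, eB]
              exact ⟨rfl, rfl⟩

theorem pvFold_comm (m0 : List Char) (L : List Char) (perm : List Int) (sh : Int)
    (hlen : perm.length = m0.length)
    (hJC : ∀ c ∈ L, (c = 'J' ∨ c = 'C') → m0 ≠ []) :
    L.foldl (pvStepA (m0.length : Int)) (perm.map (pvGatherChar m0 sh))
      = (L.foldl (pvStepB (m0.length : Int)) (perm, sh)).1.map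
          (pvGatherChar m0 (L.foldl (pvStepB (m0.length : Int)) (perm, sh)).2) := by
  induction L generalizing perm sh with
  | nil => simp
  | cons c L ih =>
    have hperm_ne : (c = 'J' ∨ c = 'C') → perm ≠ [] := by
      intro hc hnil
      have hm0 : m0 = [] := by
        have h := hlen
        rw [hnil] at h
        exact List.length_eq_zero_iff.mp h.symm
      exact (hJC c (by simp) hc) hm0
    obtain ⟨hstep, hlenstep⟩ := pvStep_comm m0 sh perm c hlen hperm_ne
    simp only [List.foldl_cons]
    rw [hstep]
    have ihr := ih (pvStepB (m0.length : Int) (perm, sh) c).1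
      (pvStepB (m0.length : Int) (perm, sh) c).2
      (by rw [hlenstep, hlen])
      (fun c' hc' => hJC c' (by simp [hc']))
    simpa using ihr

theorem pvDataset_eq (orders messages : List String) (i : Int)
    (hJC : ∀ c ∈ (PySem.List.pyGetD orders i "").toList, (c = 'J' ∨ c = 'C') →
            (PySem.List.pyGetD messages i "").toList ≠ []) :
    pvDatasetA orders messages i = pvDatasetB orders messages i := by
  simp only [pvDatasetA, pvDatasetB]
  rw [PySem.List.foldl_append_singleton_eq_map, List.nil_append]
  rw [PySem.Str.len_eq]
  have hinit : (PySem.List.pyRange 0 (((PySem.List.pyGetD messages i "").toList.length : Int)) 1).map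
      (pvGatherChar (PySem.List.pyGetD messages i "").toList 0) = (PySem.List.pyGetD messages i "").toList := by
    have h1 : (PySem.List.pyRange 0 (PySem.List.len (PySem.List.pyGetD messages i "").toList) 1).map
        (fun j => PySem.List.pyGetD (PySem.List.pyGetD messages i "").toList j '?')
        = (PySem.List.pyGetD messages i "").toList :=
      PySem.List.map_pyGetD_pyRange_zero _ '?'
    have h2 : PySem.List.len (PySem.List.pyGetD messages i "").toList
        = ((PySem.List.pyGetD messages i "").toList.length : Int) := by simp [PySem.List.len]
    rw [h2] at h1
    calc (PySem.List.pyRange 0 (((PySem.List.pyGetD messages i "").toList.length : Int)) 1).map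
          (pvGatherChar (PySem.List.pyGetD messages i "").toList 0)
        = (PySem.List.pyRange 0 (((PySem.List.pyGetD messages i "").toList.length : Int)) 1).map
          (fun j => PySem.List.pyGetD (PySem.List.pyGetD messages i "").toList j '?') :=
          List.map_congr_left (fun k _ => by rw [pvGatherChar_eq, pvShift_zero])
      _ = (PySem.List.pyGetD messages i "").toList := h1
  have hlenperm : (PySem.List.pyRange 0 (((PySem.List.pyGetD messages i "").toList.length : Int)) 1).length
      = (PySem.List.pyGetD messages i "").toList.length := by
    rw [PySem.List.pyRange_zero_natCast]
    simp
  have hfold := pvFold_comm (PySem.List.pyGetD messages i "").toList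
    (PySem.List.pyGetD orders i "").toList.reverse
    (PySem.List.pyRange 0 (((PySem.List.pyGetD messages i "").toList.length : Int)) 1) 0
    hlenperm
    (fun c hc => hJC c (List.mem_reverse.mp hc))
  rw [hinit] at hfold
  exact congrArg String.ofList hfold

-- ===== VERDICT (by name: the statement is the Claim_ definition above) =====
theorem infer_original_messages_spec : Claim_equal_infer_original_messages := by
  unfold Claim_equal_infer_original_messages
  intro n orders messages hdom hpre
  unfold Spec_infer_original_messages infer_original_messages infer_original_messages_alt
  rw [PySem.List.foldl_append_singleton_eq_map, PySem.List.foldl_append_singleton_eq_map,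
      List.nil_append, List.nil_append]
  apply List.map_congr_left
  intro i hi
  have hi' := PySem.List.mem_pyRange_one.mp hi
  have h0 : 0 ≤ i := hi'.1
  have hcast : (i.toNat : Int) = i := Int.toNat_of_nonneg h0
  have hj : i.toNat < n.toNat := by omega
  have hcond := hpre.2 i.toNat hj
  apply pvDataset_eq
  intro c hc hJC2
  rw [← hcast, PySem.List.pyGetD_natCast] at hc ⊢
  rcases hJC2 with rfl | rfl
  · exact hcond (Or.inl hc)
  · exact hcond (Or.inr hc)
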